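-- pv_equiv track=rewrite | github.com/abelobsenz/HR-Reporter | app/logic/evidence_collector.py | _sentence_bounds
-- ===== SOURCE A (Python) =====
-- def _sentence_bounds(text: str, anchor_idx: int) -> tuple[int, int]:
--     start_candidates = [text.rfind(token, 0, anchor_idx) for token in [".", "!", "?", "\n"]]
--     sent_start = max(start_candidates)
--     if sent_start < 0:
--         sent_start = 0
--     else:
--         sent_start += 1
--
--     end_candidates = [idx for token in [".", "!", "?", "\n"] if (idx := text.find(token, anchor_idx)) != -1]
--     sent_end = min(end_candidates) + 1 if end_candidates else len(text)
--     return sent_start, sent_end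
-- ===== SOURCE B (Python) =====
-- _TERM = ".!?\n"
--
--
-- def _sentence_bounds(text: str, anchor_idx: int) -> tuple[int, int]:
--     n = len(text)
--     i = anchor_idx
--     if i < 0:
--         i = max(i + n, 0)
--     elif i > n:
--         i = n
--     # backward scan: first terminator in the reversed prefix text[:i]
--     k = next((j for j, c in enumerate(reversed(text[:i])) if c in _TERM), None)
--     sent_start = 0 if k is None else i - k
--     # forward scan: first terminator in the suffix text[i:]
--     m = next((j for j, c in enumerate(text[i:]) if c in _TERM), None)
--     sent_end = n if m is None else i + m + 1
--     return sent_start, sent_end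
-- ===== Notes on version B (the rewrite author's own statement) =====
-- stated objective: simpler
-- what changed: A runs four rfind and four find library searches over the text and combines them with max/min plus a filter; B normalizes the anchor index once (Python slice-bound rule) and does two direct scans - backward over the reversed prefix and forward over the suffix - each stopping at the first sentence terminator.
import Mathlib
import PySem

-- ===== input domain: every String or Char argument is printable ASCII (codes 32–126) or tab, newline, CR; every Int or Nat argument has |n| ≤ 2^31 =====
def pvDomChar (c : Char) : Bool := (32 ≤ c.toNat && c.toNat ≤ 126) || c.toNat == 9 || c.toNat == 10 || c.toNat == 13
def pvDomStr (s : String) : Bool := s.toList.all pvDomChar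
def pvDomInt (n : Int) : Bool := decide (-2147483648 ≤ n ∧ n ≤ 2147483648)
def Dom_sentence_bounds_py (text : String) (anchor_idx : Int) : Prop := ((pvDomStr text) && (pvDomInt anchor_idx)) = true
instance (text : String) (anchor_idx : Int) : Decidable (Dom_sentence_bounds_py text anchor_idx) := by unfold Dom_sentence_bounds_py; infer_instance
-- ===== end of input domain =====

-- B replaces A's four rfind/max and four find/min library searches by one anchor
-- normalization plus two direct first-terminator scans (backward over the reversed
-- prefix, forward over the suffix); objective: simpler. A is pure (no mutation).

-- ===== PORT A =====
def sentence_bounds_py (text : String) (anchor_idx : Int) : Int × Int :=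
  let tokens : List String := [".", "!", "?", "\n"]
  let start_candidates := tokens.map (fun token => PySem.Str.rfindFrom text token 0 (some anchor_idx))
  let sent_start : Int :=
    match PySem.List.max? start_candidates (fun x => x) with
    | some v => if v < 0 then 0 else v + 1
    | none => 0
  let end_candidates := (tokens.map (fun token => PySem.Str.findFrom text token anchor_idx none)).filter (fun idx => idx != -1)
  let sent_end : Int :=
    match PySem.List.min? end_candidates (fun x => x) with
    | some v => v + 1
    | none => PySem.Str.len text
  (sent_start, sent_end)

-- ===== PORT B =====
def pvIsTerm (c : Char) : Bool := c == '.' || c == '!' || c == '?' || c == '\n'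

def sentence_bounds_py_alt (text : String) (anchor_idx : Int) : Int × Int :=
  let cs := text.toList
  let n := cs.length
  let i : Nat := (if anchor_idx < 0 then max (anchor_idx + (n : Int)) 0 else min anchor_idx (n : Int)).toNat
  let sent_start : Int :=
    match ((cs.take i).reverse).findIdx? pvIsTerm with
    | none => 0
    | some k => (i : Int) - k
  let sent_end : Int :=
    match (cs.drop i).findIdx? pvIsTerm with
    | none => (n : Int)
    | some m => (i : Int) + m + 1
  (sent_start, sent_end)


-- ===== PRECONDITION & SPEC =====
def Spec_sentence_bounds_py (text : String) (anchor_idx : Int) (out : Int × Int) : Prop := out = sentence_bounds_py_alt text anchor_idx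
instance (text : String) (anchor_idx : Int) (out : Int × Int) : Decidable (Spec_sentence_bounds_py text anchor_idx out) := by unfold Spec_sentence_bounds_py; infer_instance

-- ===== CLAIM (what is proved, stated in full; the proofs are below) =====
def Claim_equal_sentence_bounds_py : Prop := ∀ (text : String) (anchor_idx : Int), Dom_sentence_bounds_py text anchor_idx → Spec_sentence_bounds_py text anchor_idx (sentence_bounds_py text anchor_idx)

-- ===== LEMMAS AND PROOFS =====


theorem singleton_isPrefixOf_iff (c : Char) (l : List Char) :
    ([c].isPrefixOf l) = true ↔ l[0]? = some c := by
  cases l with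
  | nil => simp [List.isPrefixOf]
  | cons x t => simp [List.isPrefixOf]; exact eq_comm

theorem pfx_drop (c : Char) (s : List Char) (j : Nat) :
    ([c].isPrefixOf (List.drop j s)) = true ↔ s[j]? = some c := by
  rw [singleton_isPrefixOf_iff]
  simp

theorem rgo_none (s : List Char) (c : Char) (j : Nat)
    (h : ∀ t ≤ j, s[t]? ≠ some c) : PySem.Chars.rfind.go s [c] j = -1 := by
  induction j with
  | zero =>
    rw [PySem.Chars.rfind.go]
    rw [if_neg (by rw [singleton_isPrefixOf_iff]; exact h 0 (le_refl 0))]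
  | succ j ih =>
    rw [PySem.Chars.rfind.go]
    rw [if_neg (by rw [pfx_drop]; exact h (j+1) (le_refl _))]
    exact ih (fun t ht => h t (Nat.le_succ_of_le ht))

theorem rgo_found (s : List Char) (c : Char) (j L : Nat)
    (hL : s[L]? = some c) (hmax : ∀ t, L < t → t ≤ j → s[t]? ≠ some c) (hLe : L ≤ j) :
    PySem.Chars.rfind.go s [c] j = L := by
  induction j with
  | zero =>
    obtain rfl : L = 0 := by omega
    rw [PySem.Chars.rfind.go]
    rw [if_pos (by rw [singleton_isPrefixOf_iff]; exact hL)]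
    simp
  | succ j ih =>
    rw [PySem.Chars.rfind.go]
    by_cases hEq : L = j + 1
    · subst hEq
      rw [if_pos (by rw [pfx_drop]; exact hL)]
    · rw [if_neg (by rw [pfx_drop]; exact hmax (j+1) (by omega) (le_refl _))]
      exact ih (fun t ht htj => hmax t ht (Nat.le_succ_of_le htj)) (by omega)

theorem rgo_val (s : List Char) (c : Char) (j : Nat) :
    PySem.Chars.rfind.go s [c] j = -1 ∨
      ∃ m : Nat, m ≤ j ∧ PySem.Chars.rfind.go s [c] j = (m : Int) ∧ s[m]? = some c := by
  induction j with
  | zero =>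
    rw [PySem.Chars.rfind.go]
    by_cases h : ([c].isPrefixOf s) = true
    · right
      exact ⟨0, le_refl _, by rw [if_pos h]; simp, (singleton_isPrefixOf_iff c s).mp h⟩
    · left; rw [if_neg h]
  | succ j ih =>
    rw [PySem.Chars.rfind.go]
    by_cases h : ([c].isPrefixOf (List.drop (j+1) s)) = true
    · right
      exact ⟨j+1, le_refl _, by rw [if_pos h], (pfx_drop c s (j+1)).mp h⟩
    · rw [if_neg h]
      rcases ih with h1 | ⟨m, hm, hv, hs⟩
      · left; exact h1
      · right; exact ⟨m, Nat.le_succ_of_le hm, hv, hs⟩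

theorem rfind_char_none (s : List Char) (c : Char)
    (h : c ∉ s) : PySem.Chars.rfind s [c] = -1 := by
  rw [PySem.Chars.rfind]
  exact rgo_none s c s.length (fun t _ hc => h (List.mem_of_getElem? hc))

theorem rfind_char_found (s : List Char) (c : Char) (L : Nat)
    (hL : s[L]? = some c) (hmax : ∀ t, L < t → s[t]? ≠ some c) :
    PySem.Chars.rfind s [c] = L := by
  rw [PySem.Chars.rfind]
  have hlen : L < s.length := by
    by_contra hc
    rw [List.getElem?_eq_none (by omega)] at hL
    cases hL
  exact rgo_found s c s.length L hL (fun t ht _ => hmax t ht) (by omega)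

theorem fgo_none (c : Char) (s : List Char) (k : Nat)
    (h : c ∉ s) : PySem.Chars.find.go [c] s k = -1 := by
  induction s generalizing k with
  | nil => rw [PySem.Chars.find.go]; simp
  | cons x t ih =>
    rw [PySem.Chars.find.go]
    rw [if_neg (by rw [singleton_isPrefixOf_iff]; simp only [List.getElem?_cons_zero, Option.some.injEq]; rintro rfl; exact h List.mem_cons_self)]
    exact ih (k+1) (fun hm => h (List.mem_cons_of_mem _ hm))

theorem fgo_found (c : Char) (s : List Char) (k m : Nat)
    (hm : s[m]? = some c) (hmin : ∀ t < m, s[t]? ≠ some c) :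
    PySem.Chars.find.go [c] s k = (k : Int) + m := by
  induction s generalizing k m with
  | nil => simp at hm
  | cons x t ih =>
    rw [PySem.Chars.find.go]
    cases m with
    | zero =>
      rw [if_pos (by rw [singleton_isPrefixOf_iff]; simpa using hm)]
      simp
    | succ m =>
      rw [if_neg (by rw [singleton_isPrefixOf_iff]; simpa using hmin 0 (Nat.succ_pos _))]
      rw [ih (k+1) m (by simpa using hm) (fun t' ht' => by simpa using hmin (t'+1) (by omega))]
      push_cast; ring

theorem fgo_val (c : Char) (s : List Char) (k : Nat) :
    PySem.Chars.find.go [c] s k = -1 ∨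
      ∃ m : Nat, PySem.Chars.find.go [c] s k = (k : Int) + m ∧ s[m]? = some c := by
  induction s generalizing k with
  | nil => left; rw [PySem.Chars.find.go]; simp
  | cons x t ih =>
    rw [PySem.Chars.find.go]
    by_cases h : ([c].isPrefixOf (x :: t)) = true
    · right
      refine ⟨0, by rw [if_pos h]; simp, ?_⟩
      simpa using (singleton_isPrefixOf_iff c (x :: t)).mp h
    · rw [if_neg h]
      rcases ih (k+1) with h1 | ⟨m, hv, hs⟩
      · left; exact h1
      · right
        refine ⟨m+1, ?_, by simpa using hs⟩
        rw [hv]; push_cast; ring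

theorem find_char_none (s : List Char) (c : Char)
    (h : c ∉ s) : PySem.Chars.find s [c] = -1 := by
  rw [PySem.Chars.find]; exact fgo_none c s 0 h

theorem find_char_found (s : List Char) (c : Char) (m : Nat)
    (hm : s[m]? = some c) (hmin : ∀ t < m, s[t]? ≠ some c) :
    PySem.Chars.find s [c] = m := by
  rw [PySem.Chars.find, fgo_found c s 0 m hm hmin]; simp

theorem find_char_val (s : List Char) (c : Char) :
    PySem.Chars.find s [c] = -1 ∨
      ∃ m : Nat, PySem.Chars.find s [c] = (m : Int) ∧ s[m]? = some c := by
  rw [PySem.Chars.find]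
  rcases fgo_val c s 0 with h | ⟨m, hv, hs⟩
  · left; exact h
  · right; exact ⟨m, by simpa using hv, hs⟩

theorem findIdx?_some_spec (p : Char → Bool) (l : List Char) (k : Nat)
    (h : l.findIdx? p = some k) :
    ∃ c, l[k]? = some c ∧ p c = true ∧ ∀ j < k, ∀ x, l[j]? = some x → p x = false := by
  induction l generalizing k with
  | nil => simp at h
  | cons x t ih =>
    rw [List.findIdx?_cons] at h
    by_cases hx : p x = true
    · rw [if_pos hx] at h
      obtain rfl : k = 0 := by simpa using h.symm
      exact ⟨x, by simp, hx, by omega⟩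
    · rw [if_neg hx] at h
      cases k with
      | zero => simp at h
      | succ k =>
        have h' : t.findIdx? p = some k := by
          rcases Option.map_eq_some_iff.mp h with ⟨k', hk', he⟩
          obtain rfl : k' = k := by omega
          exact hk'
        obtain ⟨c, hc, hpc, hmin⟩ := ih k h'
        refine ⟨c, by simpa using hc, hpc, ?_⟩
        intro j hj y hy
        cases j with
        | zero =>
          simp only [List.getElem?_cons_zero, Option.some.injEq] at hy
          subst hy; simpa using hx
        | succ j => exact hmin j (by omega) y (by simpa using hy)

def pvNorm (n : Nat) (a : Int) : Nat := (if a < 0 then max (a + (n : Int)) 0 else min a (n : Int)).toNat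

theorem pvNorm_le (n : Nat) (a : Int) : pvNorm n a ≤ n := by
  unfold pvNorm; split_ifs <;> omega

theorem rfindFrom_char (cs : List Char) (c : Char) (a : Int) :
    PySem.Chars.rfindFrom cs [c] 0 (some a) =
      PySem.Chars.rfind (List.take (pvNorm cs.length a) cs) [c] := by
  rw [PySem.Chars.rfindFrom]
  have he : (if (cs.length : Int) < a then (cs.length : Int) else if a < 0 then (if a + cs.length < 0 then 0 else a + cs.length) else a).toNat = pvNorm cs.length a := by
    unfold pvNorm; split_ifs <;> omega
  norm_num
  rw [he]
  rw [if_neg (by split_ifs <;> omega)]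
  split_ifs with h0
  · exact h0.symm
  · rfl

theorem findFrom_char_le (cs : List Char) (c : Char) (a : Int) (h : a ≤ (cs.length : Int)) :
    PySem.Chars.findFrom cs [c] a none =
      (if PySem.Chars.find (List.drop (pvNorm cs.length a) cs) [c] = -1 then -1
       else (pvNorm cs.length a : Int) + PySem.Chars.find (List.drop (pvNorm cs.length a) cs) [c]) := by
  rw [PySem.Chars.findFrom]
  have hst : (if a < 0 then (if a + cs.length < 0 then 0 else a + cs.length) else a).toNat = pvNorm cs.length a := by
    unfold pvNorm; split_ifs <;> omega
  have hst' : ((pvNorm cs.length a : Nat) : Int) = (if a < 0 then (if a + cs.length < 0 then 0 else a + cs.length) else a) := by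
    unfold pvNorm; split_ifs <;> omega
  norm_num
  rw [if_neg (by split_ifs <;> omega)]
  rw [hst, ← hst']

theorem findFrom_char_big (cs : List Char) (c : Char) (a : Int) (h : (cs.length : Int) < a) :
    PySem.Chars.findFrom cs [c] a none = -1 := by
  rw [PySem.Chars.findFrom]
  have hst : (if a < 0 then (if a + (cs.length:Int) < 0 then 0 else a + cs.length) else a) = a := by
    split_ifs <;> omega
  norm_num [hst]
  intro h2
  omega


-- membership characterisation used on both sides
theorem term_cases (c : Char) (h : pvIsTerm c = true) :
    c = '.' ∨ c = '!' ∨ c = '?' ∨ c = '\n' := by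
  simp [pvIsTerm] at h
  tauto

theorem rfind_char_val (s : List Char) (c : Char) :
    PySem.Chars.rfind s [c] = -1 ∨
      ∃ m : Nat, PySem.Chars.rfind s [c] = (m : Int) ∧ s[m]? = some c := by
  rw [PySem.Chars.rfind]
  rcases rgo_val s c s.length with h | ⟨m, _, hv, hs⟩
  · left; exact h
  · right; exact ⟨m, hv, hs⟩


theorem back_eq (cs : List Char) (i : Nat) (hin : i ≤ cs.length) :
    (match PySem.List.max? [PySem.Chars.rfind (List.take i cs) ['.'], PySem.Chars.rfind (List.take i cs) ['!'],
        PySem.Chars.rfind (List.take i cs) ['?'], PySem.Chars.rfind (List.take i cs) ['\n']] (fun x => x) with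
      | some v => if v < 0 then 0 else v + 1
      | none => 0)
    = (match List.findIdx? pvIsTerm (List.take i cs).reverse with
      | none => 0
      | some k => (i : Int) - k) := by
  set p := List.take i cs with hp
  have hpl : p.length = i := by rw [hp, List.length_take]; omega
  cases hk : List.findIdx? pvIsTerm p.reverse with
  | none =>
    have hnone := List.findIdx?_eq_none_iff.mp hk
    have hfin : ∀ t : Char, pvIsTerm t = true → PySem.Chars.rfind p [t] = -1 := by
      intro t ht
      apply rfind_char_none
      intro hm
      have := hnone t (List.mem_reverse.mpr hm)
      rw [ht] at this; cases this
    rw [hfin '.' rfl, hfin '!' rfl, hfin '?' rfl, hfin '\n' rfl, PySem.List.max?_id_cons]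
    norm_num
  | some k =>
    obtain ⟨c, hc, hterm, hmin⟩ := findIdx?_some_spec _ _ _ hk
    have hkl : k < p.reverse.length := by
      by_contra h'
      rw [List.getElem?_eq_none (by omega)] at hc; cases hc
    rw [List.length_reverse, hpl] at hkl
    set L := i - 1 - k with hL
    have hpL : p[L]? = some c := by
      rw [List.getElem?_reverse (by omega)] at hc
      rw [hpl] at hc
      exact hc
    have hother : ∀ t : Char, pvIsTerm t = true → ∀ m : Nat, p[m]? = some t → m ≤ L := by
      intro t ht m hm
      by_contra h'
      have hmi : m < p.length := by
        by_contra h2; rw [List.getElem?_eq_none (by omega)] at hm; cases hm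
      have hrev : p.reverse[p.length - 1 - m]? = some t := by
        rw [List.getElem?_reverse (by omega)]
        rw [show p.length - 1 - (p.length - 1 - m) = m by omega]
        exact hm
      have hfalse := hmin (p.length - 1 - m) (by omega) t hrev
      rw [ht] at hfalse; cases hfalse
    have hrc : PySem.Chars.rfind p [c] = (L : Int) := by
      apply rfind_char_found p c L hpL
      intro t ht hcon
      have := hother c hterm t hcon; omega
    have hbnd : ∀ t : Char, pvIsTerm t = true → PySem.Chars.rfind p [t] ≤ (L : Int) := by
      intro t ht
      rcases rfind_char_val p t with hv | ⟨m, hv, hs⟩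
      · rw [hv]; omega
      · rw [hv]; exact_mod_cast hother t ht m hs
    rw [PySem.List.max?_id_cons]
    have b1 := hbnd '.' rfl
    have b2 := hbnd '!' rfl
    have b3 := hbnd '?' rfl
    have b4 := hbnd '\n' rfl
    have hmaxv : List.foldl max (PySem.Chars.rfind p ['.'])
        [PySem.Chars.rfind p ['!'], PySem.Chars.rfind p ['?'], PySem.Chars.rfind p ['\n']] = (L : Int) := by
      simp only [List.foldl]
      rcases term_cases c hterm with rfl | rfl | rfl | rfl <;> omega
    rw [hmaxv]
    show (if (L : Int) < 0 then 0 else (L : Int) + 1) = (i : Int) - k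
    rw [if_neg (by omega)]
    omega

theorem fwd_eq (cs : List Char) (a : Int) :
    (match PySem.List.min? (List.filter (fun idx => idx != -1)
        [PySem.Chars.findFrom cs ['.'] a, PySem.Chars.findFrom cs ['!'] a,
         PySem.Chars.findFrom cs ['?'] a, PySem.Chars.findFrom cs ['\n'] a]) (fun x => x) with
      | some v => v + 1
      | none => (cs.length : Int))
    = (match List.findIdx? pvIsTerm (List.drop (pvNorm cs.length a) cs) with
      | none => (cs.length : Int)
      | some m => (pvNorm cs.length a : Int) + m + 1) := by
  by_cases hA : a ≤ (cs.length : Int)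
  · rw [findFrom_char_le cs '.' a hA, findFrom_char_le cs '!' a hA,
       findFrom_char_le cs '?' a hA, findFrom_char_le cs '\n' a hA]
    set i := pvNorm cs.length a with hidef
    set d := List.drop i cs with hd
    cases hm : List.findIdx? pvIsTerm d with
    | none =>
      have hnone := List.findIdx?_eq_none_iff.mp hm
      have hfin : ∀ t : Char, pvIsTerm t = true → PySem.Chars.find d [t] = -1 := by
        intro t ht
        apply find_char_none
        intro hmem
        have := hnone t hmem
        rw [ht] at this; cases this
      rw [hfin '.' rfl, hfin '!' rfl, hfin '?' rfl, hfin '\n' rfl]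
      norm_num [PySem.List.min?]
    | some m =>
      obtain ⟨c, hc, hterm, hmin⟩ := findIdx?_some_spec _ _ _ hm
      have hfc : PySem.Chars.find d [c] = (m : Int) := by
        apply find_char_found d c m hc
        intro t ht hcon
        have := hmin t ht c hcon
        rw [hterm] at this; cases this
      have hbnd : ∀ t : Char, pvIsTerm t = true →
          (if PySem.Chars.find d [t] = -1 then (-1 : Int)
           else (i : Int) + PySem.Chars.find d [t]) = -1 ∨
          ((i : Int) + m ≤ (if PySem.Chars.find d [t] = -1 then (-1 : Int)
           else (i : Int) + PySem.Chars.find d [t])) := by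
        intro t ht
        rcases find_char_val d t with hv | ⟨m', hv, hs⟩
        · left; rw [hv]; simp
        · right
          rw [hv, if_neg (by omega)]
          have hmm : m ≤ m' := by
            by_contra h'
            have := hmin m' (by omega) t hs
            rw [ht] at this; cases this
          omega
      set l' := List.filter (fun idx => idx != -1)
        [if PySem.Chars.find d ['.'] = -1 then (-1:Int) else (i : Int) + PySem.Chars.find d ['.'],
         if PySem.Chars.find d ['!'] = -1 then (-1:Int) else (i : Int) + PySem.Chars.find d ['!'],
         if PySem.Chars.find d ['?'] = -1 then (-1:Int) else (i : Int) + PySem.Chars.find d ['?'],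
         if PySem.Chars.find d ['\n'] = -1 then (-1:Int) else (i : Int) + PySem.Chars.find d ['\n']] with hl'
      have hifc : (if PySem.Chars.find d [c] = -1 then (-1:Int) else (i : Int) + PySem.Chars.find d [c]) = (i : Int) + m := by
        rw [hfc, if_neg (by omega)]
      have hmemc : ((i : Int) + m) ∈ l' := by
        rw [hl', List.mem_filter]
        refine ⟨?_, by simp only [bne_iff_ne, ne_eq]; omega⟩
        rw [← hifc]
        rcases term_cases c hterm with rfl | rfl | rfl | rfl <;> simp
      have hlow : ∀ v ∈ l', (i : Int) + m ≤ v := by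
        intro v hv
        rw [hl', List.mem_filter] at hv
        obtain ⟨hvm, hvne⟩ := hv
        have hne : v ≠ -1 := by simpa using hvne
        simp only [List.mem_cons, List.not_mem_nil, or_false] at hvm
        rcases hvm with rfl | rfl | rfl | rfl
        · rcases hbnd '.' rfl with h | h
          · exact absurd h hne
          · exact h
        · rcases hbnd '!' rfl with h | h
          · exact absurd h hne
          · exact h
        · rcases hbnd '?' rfl with h | h
          · exact absurd h hne
          · exact h
        · rcases hbnd '\n' rfl with h | h
          · exact absurd h hne
          · exact h
      cases hq : PySem.List.min? l' (fun x => x) with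
      | none =>
        have hnil := (PySem.List.min?_eq_none_iff l' _).mp hq
        rw [hnil] at hmemc
        cases hmemc
      | some w =>
        have hwle := PySem.List.min?_isMin hq _ hmemc
        have hge := hlow w (PySem.List.min?_mem hq)
        show w + 1 = (i : Int) + m + 1
        omega
  · rw [findFrom_char_big cs '.' a (by omega), findFrom_char_big cs '!' a (by omega),
       findFrom_char_big cs '?' a (by omega), findFrom_char_big cs '\n' a (by omega)]
    have hi : pvNorm cs.length a = cs.length := by unfold pvNorm; split_ifs <;> omega
    rw [hi, List.drop_length]
    norm_num [PySem.List.min?]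

theorem main_thm (text : String) (a : Int) :
    sentence_bounds_py text a = sentence_bounds_py_alt text a := by
  simp only [sentence_bounds_py, sentence_bounds_py_alt, List.map_cons, List.map_nil,
    PySem.Str.rfindFrom_eq, PySem.Str.findFrom_eq]
  have htok1 : ".".toList = ['.'] := rfl
  have htok2 : "!".toList = ['!'] := rfl
  have htok3 : "?".toList = ['?'] := rfl
  have htok4 : "\n".toList = ['\n'] := rfl
  rw [htok1, htok2, htok3, htok4]
  set cs := text.toList with hcs
  have hB : (if a < 0 then max (a + (cs.length : Int)) 0 else min a (cs.length : Int)).toNat = pvNorm cs.length a := rfl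
  rw [hB]
  set i := pvNorm cs.length a with hidef
  have hin : i ≤ cs.length := pvNorm_le _ _
  simp only [rfindFrom_char]
  rw [← hidef]
  rw [Prod.mk.injEq]
  constructor
  · exact back_eq cs i hin
  · have hlen : PySem.Str.len text = ((cs.length : Nat) : Int) := rfl
    rw [hlen]
    have := fwd_eq cs a
    rw [← hidef] at this
    rw [this]

-- ===== VERDICT (by name: the statement is the Claim_ definition above) =====
theorem sentence_bounds_py_spec : Claim_equal_sentence_bounds_py := by
  intro text anchor_idx _
  unfold Spec_sentence_bounds_py
  exact main_thm text anchor_idx
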